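-- pv_equiv track=rewrite | github.com/blatth/uba-introprog | Parciales/Parcial Python/Parcial2024TT.py | subsecuencia_mas_larga
-- ===== SOURCE A (Python) =====
-- def subsecuencia_mas_larga(tipos_pacientes_atendidos: list[str]) -> int:
--     max_longitud = 0
--     max_indice = 0
--     longitud_actual = 0
--     indice_actual = 0
--
--     for i in range(len(tipos_pacientes_atendidos)):
--         if tipos_pacientes_atendidos[i] == "perro" or tipos_pacientes_atendidos[i] == "gato":
--             if longitud_actual == 0:
--                 indice_actual = i
--             longitud_actual += 1
--             if longitud_actual > max_longitud:
--                 max_longitud = longitud_actual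
--                 max_indice = indice_actual
--
--         else:
--             longitud_actual = 0
--
--     return max_indice
-- ===== SOURCE B (Python) =====
-- def subsecuencia_mas_larga(tipos_pacientes_atendidos: list[str]) -> int:
--     # Two-phase approach: first extract the maximal runs of perro/gato as
--     # (start, length) pairs, then pick the start of the first longest run.
--     valid = ("perro", "gato")
--     runs = []
--     i = 0
--     n = len(tipos_pacientes_atendidos)
--     while i < n:
--         if tipos_pacientes_atendidos[i] in valid:
--             j = i
--             while j < n and tipos_pacientes_atendidos[j] in valid:
--                 j += 1
--             runs.append((i, j - i))
--             i = j
--         else: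
--             i += 1
--     best_len = 0
--     best_idx = 0
--     for start, length in runs:
--         if length > best_len:
--             best_len = length
--             best_idx = start
--     return best_idx
-- ===== Notes on version B (the rewrite author's own statement) =====
-- stated objective: alternative
-- what changed: A keeps a 4-variable running state (current run length/start, best run length/start) updated element by element; B first materializes the list of maximal perro/gato runs as (start,length) pairs and then scans that run list for the first strictly longest run.
import Mathlib
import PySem

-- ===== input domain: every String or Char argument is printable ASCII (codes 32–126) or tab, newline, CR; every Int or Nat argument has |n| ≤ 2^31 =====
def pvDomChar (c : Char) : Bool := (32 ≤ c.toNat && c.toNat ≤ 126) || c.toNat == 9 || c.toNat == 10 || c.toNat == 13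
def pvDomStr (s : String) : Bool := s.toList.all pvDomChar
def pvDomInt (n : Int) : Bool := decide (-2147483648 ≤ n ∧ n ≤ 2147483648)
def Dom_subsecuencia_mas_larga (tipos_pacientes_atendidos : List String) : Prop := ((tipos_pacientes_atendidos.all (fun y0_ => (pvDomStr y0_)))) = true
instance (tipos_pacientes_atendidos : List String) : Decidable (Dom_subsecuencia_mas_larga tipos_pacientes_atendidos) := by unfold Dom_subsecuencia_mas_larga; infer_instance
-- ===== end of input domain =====

-- B replaces A's single-pass 4-variable state machine with run extraction
-- ((start,length) pairs) followed by a strict-max scan over the runs; objective: alternative.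

-- ===== PORT A =====
-- loop body of A: state = (max_longitud, max_indice, longitud_actual, indice_actual)
def pvStepA (st : Int × Int × Int × Int) (i : Int) (x : String) : Int × Int × Int × Int :=
  let (ml, mi, cl, ci) := st
  if x == "perro" || x == "gato" then
    let ci' := if cl == 0 then i else ci
    let cl' := cl + 1
    if cl' > ml then (cl', ci', cl', ci') else (ml, mi, cl', ci')
  else (ml, mi, 0, ci)

def subsecuencia_mas_larga (tipos_pacientes_atendidos : List String) : Int :=
  ((PySem.List.pyRange 0 (tipos_pacientes_atendidos.length : Int) 1).foldl
    (fun st i => pvStepA st i ((PySem.List.pyGet? tipos_pacientes_atendidos i).getD ""))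
    (0, 0, 0, 0)).2.1

-- ===== PORT B =====
def pvValid (s : String) : Bool := s == "perro" || s == "gato"

-- length of the maximal valid run at the head (the inner while of Source B)
def pvRunLen : List String → Nat
  | [] => 0
  | x :: r => if pvValid x then pvRunLen r + 1 else 0

-- the outer while of Source B: list of (start, length) pairs of maximal runs
def pvRuns : List String → Int → List (Int × Int)
  | [], _ => []
  | x :: r, i =>
    if pvValid x then
      (i, (pvRunLen r : Int) + 1) :: pvRuns (r.drop (pvRunLen r)) (i + (pvRunLen r : Int) + 1)
    else
      pvRuns r (i + 1)
termination_by l _ => l.length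
decreasing_by
  · simp [List.length_drop]
  · exact Nat.lt_succ_self _

-- final scan of Source B: accumulator = (best_len, best_idx)
def pvBest (rs : List (Int × Int)) (b : Int × Int) : Int × Int :=
  rs.foldl (fun b r => if r.2 > b.1 then (r.2, r.1) else b) b

def subsecuencia_mas_larga_alt (tipos_pacientes_atendidos : List String) : Int :=
  (pvBest (pvRuns tipos_pacientes_atendidos 0) (0, 0)).2

-- ===== PRECONDITION & SPEC =====
def Spec_subsecuencia_mas_larga (tipos_pacientes_atendidos : List String) (out : Int) : Prop := out = subsecuencia_mas_larga_alt tipos_pacientes_atendidos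
instance (tipos_pacientes_atendidos : List String) (out : Int) : Decidable (Spec_subsecuencia_mas_larga tipos_pacientes_atendidos out) := by unfold Spec_subsecuencia_mas_larga; infer_instance

-- ===== CLAIM (what is proved, stated in full; the proofs are below) =====
def Claim_equal_subsecuencia_mas_larga : Prop := ∀ (tipos_pacientes_atendidos : List String), Dom_subsecuencia_mas_larga tipos_pacientes_atendidos → Spec_subsecuencia_mas_larga tipos_pacientes_atendidos (subsecuencia_mas_larga tipos_pacientes_atendidos)

-- ===== LEMMAS AND PROOFS =====

-- A's loop as structural recursion over the list, carrying the absolute index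
def pvFoldA : List String → Int → (Int × Int × Int × Int) → Int × Int × Int × Int
  | [], _, st => st
  | x :: r, i, st => pvFoldA r (i + 1) (pvStepA st i x)

lemma pvFoldA_append (p q : List String) (i : Int) (st : Int × Int × Int × Int) :
    pvFoldA (p ++ q) i st = pvFoldA q (i + p.length) (pvFoldA p i st) := by
  induction p generalizing i st with
  | nil => simp [pvFoldA]
  | cons x r ih =>
      simp only [List.cons_append, pvFoldA, ih, List.length_cons]
      congr 1
      push_cast; ring

-- bridge: A's foldl over pyRange = pvFoldA over the suffix
lemma pvBridgeA (ys : List String) : ∀ (n : Nat) (a : Int), 0 ≤ a → a.toNat + n = ys.length →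
    ∀ st, (PySem.List.pyRange a (ys.length : Int) 1).foldl
      (fun st i => pvStepA st i ((PySem.List.pyGet? ys i).getD "")) st
      = pvFoldA (ys.drop a.toNat) a st := by
  intro n
  induction n with
  | zero =>
      intro a ha hlen st
      rw [PySem.List.pyRange_one_eq_nil (by omega), List.drop_of_length_le (by omega)]
      simp [pvFoldA]
  | succ m ih =>
      intro a ha hlen st
      have hlt : a.toNat < ys.length := by omega
      have hcast : a < (ys.length : Int) := by omega
      rw [PySem.List.pyRange_one_cons hcast]
      rw [List.drop_eq_getElem_cons hlt]
      simp only [List.foldl_cons, pvFoldA]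
      have hget : PySem.List.pyGet? ys a = some ys[a.toNat] := by
        simp [PySem.List.pyGet?, PySem.List.pyIdx?, ha, hcast]
      rw [hget]
      have hnat : (a + 1).toNat = a.toNat + 1 := by omega
      have := ih (a + 1) (by omega) (by omega) (pvStepA st a ys[a.toNat])
      rw [hnat] at this
      simpa using this

lemma pvRunLen_le (r : List String) : pvRunLen r ≤ r.length := by
  induction r with
  | nil => simp [pvRunLen]
  | cons x t ih => by_cases hx : pvValid x = true <;> simp [pvRunLen, hx] <;> omega

-- the run at the head is all valid, and what follows starts invalid
lemma pvTake_runLen_valid (r : List String) : ∀ y ∈ r.take (pvRunLen r), pvValid y = true := by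
  induction r with
  | nil => simp
  | cons x t ih =>
      by_cases hx : pvValid x = true
      · simp only [pvRunLen, hx, if_pos]
        intro y hy
        rcases List.mem_cons.mp (by simpa using hy) with h | h
        · subst h; exact hx
        · exact ih y h
      · simp [pvRunLen, hx]

lemma pvDrop_runLen (r : List String) :
    r.drop (pvRunLen r) = [] ∨ ∃ y t, r.drop (pvRunLen r) = y :: t ∧ pvValid y = false := by
  induction r with
  | nil => simp
  | cons x t ih =>
      by_cases hx : pvValid x = true
      · simpa [pvRunLen, hx] using ih
      · right
        exact ⟨x, t, by simp [pvRunLen, hx], by simpa using hx⟩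

-- consuming an all-valid run from a mid-run state (the running max already covers cl : cl ≤ ml)
lemma pvRunStep (p : List String) : ∀ (i ml mi cl ci : Int), (∀ y ∈ p, pvValid y = true) →
    0 < cl → cl ≤ ml →
    pvFoldA p i (ml, mi, cl, ci)
      = (if cl + (p.length : Int) > ml then ((cl + p.length : Int), ci, (cl + p.length : Int), ci)
         else (ml, mi, (cl + p.length : Int), ci)) := by
  induction p with
  | nil =>
      intro i ml mi cl ci _ hcl hle
      rw [if_neg (by simp; omega)]
      simp [pvFoldA]
  | cons x r ih =>
      intro i ml mi cl ci hval hcl hle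
      have hx : pvValid x = true := hval x (by simp)
      have hclne : (cl == 0) = false := by simp; omega
      simp only [pvFoldA, pvStepA]
      rw [if_pos (by simpa [pvValid] using hx)]
      simp only [hclne, Bool.false_eq_true, if_false]
      by_cases h1 : cl + 1 > ml
      · rw [if_pos h1, ih (i+1) (cl+1) ci (cl+1) ci (fun y hy => hval y (by simp [hy])) (by omega) le_rfl]
        simp only [List.length_cons]
        split_ifs with h2 h3 h3 <;>
          first
              | ((try push_cast at *); (try exfalso); omega)
              | (simp only [Prod.mk.injEq]; (try push_cast at *); and_intros <;> first | trivial | omega)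
      · rw [if_neg h1, ih (i+1) ml mi (cl+1) ci (fun y hy => hval y (by simp [hy])) (by omega) (by omega)]
        simp only [List.length_cons]
        split_ifs with h2 h3 h3 <;>
          first
              | ((try push_cast at *); (try exfalso); omega)
              | (simp only [Prod.mk.injEq]; (try push_cast at *); and_intros <;> first | trivial | omega)

def pvMaxPair (st : Int × Int × Int × Int) : Int × Int := (st.1, st.2.1)

-- main invariant: from an out-of-run state, A's fold computes B's best-of-runs scan
lemma pvMain : ∀ (n : Nat) (xs : List String), xs.length = n → ∀ (i ml mi ci : Int),
    pvMaxPair (pvFoldA xs i (ml, mi, 0, ci)) = pvBest (pvRuns xs i) (ml, mi) := by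
  intro n
  induction n using Nat.strong_induction_on with
  | _ n IH =>
    intro xs hlen i ml mi ci
    match xs, hlen with
    | [], _ => simp [pvFoldA, pvRuns, pvBest, pvMaxPair]
    | x :: r, hlen =>
      by_cases hx : pvValid x = true
      · -- a run of length k+1 starts here
        set k := pvRunLen r with hk
        have hkle : k ≤ r.length := pvRunLen_le r
        have hsplit : r = r.take k ++ r.drop k := (List.take_append_drop k r).symm
        simp only [pvFoldA, pvStepA]
        rw [if_pos (by simpa [pvValid] using hx)]
        simp only [beq_self_eq_true, if_true, zero_add]
        rw [pvRuns, if_pos hx, ← hk]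
        have hrw : pvFoldA r (i + 1) =
            fun st => pvFoldA (r.drop k) (i + 1 + (r.take k).length) (pvFoldA (r.take k) (i+1) st) := by
          funext st
          conv_lhs => rw [hsplit]
          rw [pvFoldA_append]
        -- state after the whole run
        have hafter :
            pvFoldA (r.take k) (i+1) (if (1:Int) > ml then ((1:Int), i, (1:Int), i) else (ml, mi, 1, i))
              = (if ((k:Int) + 1 > ml) then ((k : Int) + 1, i, (k : Int) + 1, i)
                 else (ml, mi, (k : Int) + 1, i)) := by
          by_cases h1 : (1:Int) > ml
          · rw [if_pos h1,
              pvRunStep (r.take k) (i+1) 1 i 1 i (pvTake_runLen_valid r) (by omega) le_rfl]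
            rw [List.length_take, Nat.min_eq_left hkle]
            split_ifs with h2 h3 h3 <;>
              first
              | ((try push_cast at *); (try exfalso); omega)
              | (simp only [Prod.mk.injEq]; (try push_cast at *); and_intros <;> first | trivial | omega)
          · rw [if_neg h1,
              pvRunStep (r.take k) (i+1) ml mi 1 i (pvTake_runLen_valid r) (by omega) (by omega)]
            rw [List.length_take, Nat.min_eq_left hkle]
            split_ifs with h2 h3 h3 <;>
              first
              | ((try push_cast at *); (try exfalso); omega)
              | (simp only [Prod.mk.injEq]; (try push_cast at *); and_intros <;> first | trivial | omega)
        rw [hrw]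
        simp only []
        rw [hafter]
        rw [List.length_take, Nat.min_eq_left hkle]
        have hbest : pvBest ((i, (k:Int)+1) :: pvRuns (r.drop k) (i + ((k:Int)+1))) (ml, mi)
            = pvBest (pvRuns (r.drop k) (i + ((k:Int)+1)))
                (if (k:Int)+1 > ml then ((k:Int)+1, i) else (ml, mi)) := by
          simp only [pvBest, List.foldl_cons]
        have hidx : i + (k:Int) + 1 = i + ((k:Int)+1) := by ring
        rw [hidx, hbest]
        have hidx2 : i + 1 + (k:Int) = i + ((k:Int)+1) := by ring
        rw [hidx2]
        rcases pvDrop_runLen r with h0 | ⟨y, t, hyt, hyv⟩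
        · rw [h0]
          simp only [pvFoldA, pvRuns, pvBest, List.foldl_nil, pvMaxPair]
          split_ifs <;> rfl
        · rw [hyt]
          have hyv2 : (y == "perro" || y == "gato") = false := by simpa [pvValid] using hyv
          have ht : t.length < n := by
            have h1 : (y :: t).length = r.length - pvRunLen r := by rw [← hyt, List.length_drop]
            simp only [List.length_cons] at h1 hlen
            omega
          conv_rhs => rw [pvRuns, if_neg (show ¬ pvValid y = true by simp [hyv])]
          split_ifs with h2
          · simpa [pvFoldA, pvStepA, hyv2] using
              IH t.length ht t rfl (i + ((k:Int)+1) + 1) ((k:Int)+1) i i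
          · simpa [pvFoldA, pvStepA, hyv2] using
              IH t.length ht t rfl (i + ((k:Int)+1) + 1) ml mi i
      · -- invalid head: state unchanged, skip
        simp only [pvFoldA, pvStepA]
        rw [if_neg (by simp [pvValid] at hx ⊢; tauto)]
        rw [pvRuns, if_neg (by simp [hx])]
        exact IH r.length (by simp at hlen; omega) r rfl (i+1) ml mi ci

-- ===== VERDICT (by name: the statement is the Claim_ definition above) =====
theorem subsecuencia_mas_larga_spec : Claim_equal_subsecuencia_mas_larga := by
  intro xs _
  unfold Spec_subsecuencia_mas_larga subsecuencia_mas_larga subsecuencia_mas_larga_alt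
  rw [pvBridgeA xs xs.length 0 le_rfl (by simp)]
  simp only [Int.toNat_zero, List.drop_zero]
  have := pvMain xs.length xs rfl 0 0 0 0
  simpa [pvMaxPair] using congrArg Prod.snd this
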